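-- pv_equiv track=rewrite | github.com/ayeffkay/rubert-tiny | lm_seqs_dataset.py | gen_t2s_mapping
-- ===== SOURCE A (Python) =====
-- def gen_t2s_mapping(teacher_tokens, teacher_mapping):
--     t2s = []
--     idxs = []
--     dx = 0
--     for t in teacher_tokens:
--         mapping = teacher_mapping[t]
--         t2s.extend(mapping)
--         idxs.append(list(range(dx, dx + len(mapping))))
--         dx += len(mapping)
--     return t2s, idxs
-- ===== SOURCE B (Python) =====
-- from itertools import accumulate, chain
--
-- def gen_t2s_mapping(teacher_tokens, teacher_mapping):
--     lengths = [len(teacher_mapping[t]) for t in teacher_tokens]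
--     offsets = accumulate(lengths, initial=0)
--     idxs = [list(range(s, s + n)) for s, n in zip(offsets, lengths)]
--     t2s = list(chain.from_iterable(teacher_mapping[t] for t in teacher_tokens))
--     return t2s, idxs
-- ===== Notes on version B (the rewrite author's own statement) =====
-- stated objective: alternative
-- what changed: Replaces the single loop with a running dx accumulator by three decoupled passes: per-token lengths, prefix-sum offsets via itertools.accumulate, ranges built from zipped (offset,length) pairs, and a separate flatten via itertools.chain.
import Mathlib
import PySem

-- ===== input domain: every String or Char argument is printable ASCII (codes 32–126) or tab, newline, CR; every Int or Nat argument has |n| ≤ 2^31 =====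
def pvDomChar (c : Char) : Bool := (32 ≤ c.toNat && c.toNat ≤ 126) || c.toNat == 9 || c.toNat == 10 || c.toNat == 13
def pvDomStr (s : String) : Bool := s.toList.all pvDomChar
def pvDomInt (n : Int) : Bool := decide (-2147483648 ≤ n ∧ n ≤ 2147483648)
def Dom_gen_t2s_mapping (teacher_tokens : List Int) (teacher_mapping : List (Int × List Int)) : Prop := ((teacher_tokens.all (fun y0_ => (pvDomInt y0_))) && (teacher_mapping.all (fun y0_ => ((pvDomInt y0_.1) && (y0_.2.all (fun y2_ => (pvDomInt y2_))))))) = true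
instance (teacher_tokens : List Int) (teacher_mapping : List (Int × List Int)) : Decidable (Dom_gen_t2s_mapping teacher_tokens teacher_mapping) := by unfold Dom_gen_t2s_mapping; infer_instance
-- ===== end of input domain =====

-- B is an alternative decomposition of A (three decoupled passes instead of one loop
-- with a running accumulator); equivalence is about the return value (no mutation).

-- ===== PORT A =====
-- one loop over teacher_tokens, state (t2s, idxs, dx); teacher_mapping[t] = dict lookup
def gen_t2s_mapping (teacher_tokens : List Int) (teacher_mapping : List (Int × List Int)) : List Int × List (List Int) :=
  let st := teacher_tokens.foldl
    (fun (st : List Int × List (List Int) × Int) t =>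
      let mapping := ((PySem.Dict.mk teacher_mapping).get? t).getD []
      (st.1 ++ mapping,
       st.2.1 ++ [PySem.List.pyRange st.2.2 (st.2.2 + mapping.length) 1],
       st.2.2 + mapping.length))
    ([], [], 0)
  (st.1, st.2.1)

-- ===== PORT B =====
-- B: lengths pass, prefix-sum offsets (accumulate with initial=0 = scanl), zip to build
-- the ranges, and a separate flatten (chain.from_iterable = flatMap)
def gen_t2s_mapping_alt (teacher_tokens : List Int) (teacher_mapping : List (Int × List Int)) : List Int × List (List Int) :=
  let lengths : List Int := teacher_tokens.map (fun t => ((((PySem.Dict.mk teacher_mapping).get? t).getD []).length : Int))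
  let offsets : List Int := lengths.scanl (· + ·) 0
  let idxs := (offsets.zip lengths).map (fun p => PySem.List.pyRange p.1 (p.1 + p.2) 1)
  let t2s := teacher_tokens.flatMap (fun t => ((PySem.Dict.mk teacher_mapping).get? t).getD [])
  (t2s, idxs)

-- ===== PRECONDITION & SPEC =====
-- A raises KeyError (and so does B) when a token is missing from teacher_mapping.
def Pre_gen_t2s_mapping (teacher_tokens : List Int) (teacher_mapping : List (Int × List Int)) : Prop :=
  ∀ t ∈ teacher_tokens, t ∈ teacher_mapping.map Prod.fst
instance (teacher_tokens : List Int) (teacher_mapping : List (Int × List Int)) : Decidable (Pre_gen_t2s_mapping teacher_tokens teacher_mapping) := by unfold Pre_gen_t2s_mapping; infer_instance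
def pvWitness_gen_t2s_mapping : List Int × (List (Int × List Int)) := ([1, 2, 1], [(1, [5, 6]), (2, [7])])

def Spec_gen_t2s_mapping (teacher_tokens : List Int) (teacher_mapping : List (Int × List Int)) (out : List Int × List (List Int)) : Prop := out = gen_t2s_mapping_alt teacher_tokens teacher_mapping
instance (teacher_tokens : List Int) (teacher_mapping : List (Int × List Int)) (out : List Int × List (List Int)) : Decidable (Spec_gen_t2s_mapping teacher_tokens teacher_mapping out) := by unfold Spec_gen_t2s_mapping; infer_instance

-- ===== CLAIM (what is proved, stated in full; the proofs are below) =====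
def Claim_equal_gen_t2s_mapping : Prop := ∀ (teacher_tokens : List Int) (teacher_mapping : List (Int × List Int)), Dom_gen_t2s_mapping teacher_tokens teacher_mapping → Pre_gen_t2s_mapping teacher_tokens teacher_mapping → Spec_gen_t2s_mapping teacher_tokens teacher_mapping (gen_t2s_mapping teacher_tokens teacher_mapping)

-- ===== LEMMAS AND PROOFS =====

-- generalised loop invariant: A's fold from an arbitrary state equals B's three passes
-- shifted by that state
theorem gen_t2s_fold_eq (tm : List (Int × List Int)) (tt : List Int)
    (acc1 : List Int) (acc2 : List (List Int)) (dx : Int) :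
    tt.foldl
      (fun (st : List Int × List (List Int) × Int) t =>
        let mapping := ((PySem.Dict.mk tm).get? t).getD []
        (st.1 ++ mapping,
         st.2.1 ++ [PySem.List.pyRange st.2.2 (st.2.2 + mapping.length) 1],
         st.2.2 + mapping.length))
      (acc1, acc2, dx)
    = (acc1 ++ tt.flatMap (fun t => ((PySem.Dict.mk tm).get? t).getD []),
       acc2 ++ (((tt.map (fun t => ((((PySem.Dict.mk tm).get? t).getD []).length : Int))).scanl (· + ·) dx).zip
                 (tt.map (fun t => ((((PySem.Dict.mk tm).get? t).getD []).length : Int)))).map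
                 (fun p => PySem.List.pyRange p.1 (p.1 + p.2) 1),
       dx + ((tt.map (fun t => ((((PySem.Dict.mk tm).get? t).getD []).length : Int))).sum)) := by
  induction tt generalizing acc1 acc2 dx with
  | nil => simp
  | cons h t ih =>
    simp only [List.foldl_cons, List.map_cons, List.scanl_cons, List.zip_cons_cons,
      List.map_cons, List.flatMap_cons, List.sum_cons]
    rw [ih]
    refine Prod.ext (by simp) (Prod.ext ?_ ?_)
    · simp
    · simp; ring

-- ===== VERDICT (by name: the statement is the Claim_ definition above) =====
theorem gen_t2s_mapping_spec : Claim_equal_gen_t2s_mapping := by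
  intro tt tm _ _
  unfold Spec_gen_t2s_mapping gen_t2s_mapping gen_t2s_mapping_alt
  rw [gen_t2s_fold_eq]
  simp
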